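-- pv_equiv track=rewrite | github.com/Jamesdhandhukiya/Kenexai | server/services/test_questions.py | _expand_questions_to_target
-- ===== SOURCE A (Python) =====
-- from typing import List, Dict, Any, Optional
--
-- def _expand_questions_to_target(questions: List[Dict[str, Any]], target: int) -> List[Dict[str, Any]]:
--     """If there are fewer questions than target, create harmless variants to reach the target count."""
--     if len(questions) >= target:
--         return questions[:target]
--
--     expanded = list(questions)
--     copy_count = 0
--     while len(expanded) < target and questions:
--         template = questions[copy_count % len(questions)]
--         variant_index = (copy_count // len(questions)) + 1
--         new_q = {**template}
--         new_q['id'] = f"{template['id']}_v{variant_index}"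
--         new_q['question'] = f"{template['question']} (variant {variant_index})"
--         expanded.append(new_q)
--         copy_count += 1
--     return expanded
-- ===== SOURCE B (Python) =====
-- def _make_variant(template, variant_index):
--     new_q = {**template}
--     new_q['id'] = f"{template['id']}_v{variant_index}"
--     new_q['question'] = f"{template['question']} (variant {variant_index})"
--     return new_q
--
--
-- def _expand_questions_to_target(questions, target):
--     if len(questions) >= target:
--         return questions[:target]
--     expanded = list(questions)
--     if not questions:
--         return expanded
--     n = len(questions)
--     full, rem = divmod(target - n, n)
--     for v in range(full):
--         expanded.extend(_make_variant(q, v + 1) for q in questions)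
--     expanded.extend(_make_variant(q, full + 1) for q in questions[:rem])
--     return expanded
-- ===== Notes on version B (the rewrite author's own statement) =====
-- stated objective: alternative
-- what changed: Replaces the while-loop with per-element copy_count modulo/division arithmetic by computing divmod(target-len, len) once and emitting whole variant rounds (full rounds over all questions, then a partial round over questions[:rem]).
import Mathlib
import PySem

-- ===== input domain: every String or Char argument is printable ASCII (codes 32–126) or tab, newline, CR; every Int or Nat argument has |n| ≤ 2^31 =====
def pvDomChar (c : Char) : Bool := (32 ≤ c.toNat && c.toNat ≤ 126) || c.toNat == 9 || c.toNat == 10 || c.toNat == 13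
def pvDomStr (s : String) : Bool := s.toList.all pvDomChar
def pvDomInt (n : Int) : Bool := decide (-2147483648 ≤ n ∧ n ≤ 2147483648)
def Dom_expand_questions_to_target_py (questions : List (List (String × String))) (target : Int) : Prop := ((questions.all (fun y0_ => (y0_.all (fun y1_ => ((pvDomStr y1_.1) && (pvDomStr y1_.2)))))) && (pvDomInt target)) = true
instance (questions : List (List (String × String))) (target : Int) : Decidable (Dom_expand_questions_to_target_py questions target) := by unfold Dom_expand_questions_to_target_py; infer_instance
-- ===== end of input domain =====

-- B replaces A's while-loop (per-element copy_count modulo/division) by one divmod and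
-- explicit whole variant rounds; same values, same order (objective: alternative).

-- ===== PORT A =====
-- new_q = {**template}; new_q['id'] = ...; new_q['question'] = ... ; dicts are assoc lists,
-- built through PySem.Dict (insertion order, overwrite in place). Missing keys raise KeyError
-- in Python (excluded by Pre_); the port uses getD "" there.
-- copy_count is a nonnegative Python int and len(questions) > 0 inside the loop, so
-- Python's % and // coincide with Nat % and / (exact on this domain).
def pvLoopA (questions : List (List (String × String))) (target : Int)
    (expanded : List (List (String × String))) (copy_count : Nat) : List (List (String × String)) :=
  if h : (expanded.length : Int) < target ∧ questions ≠ [] then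
    let n := questions.length
    let template := (PySem.List.pyGet? questions ((copy_count % n : Nat) : Int)).getD []
    let variant_index : Nat := copy_count / n + 1
    let d := PySem.Dict.ofList template
    let new_q := ((d.insert "id" (((d.get? "id").getD "") ++ "_v" ++ PySem.Int.toStr (variant_index : Int))).insert
        "question" (((d.get? "question").getD "") ++ " (variant " ++ PySem.Int.toStr (variant_index : Int) ++ ")")).items
    pvLoopA questions target (expanded ++ [new_q]) (copy_count + 1)
  else expanded
termination_by (target - expanded.length).toNat
decreasing_by simp only [List.length_append, List.length_cons, List.length_nil]; omega

def expand_questions_to_target_py (questions : List (List (String × String))) (target : Int) : List (List (String × String)) :=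
  if (questions.length : Int) ≥ target then PySem.List.slice questions none (some target)
  else pvLoopA questions target questions 0

-- ===== PORT B =====
-- _make_variant(template, variant_index); variant_index > 0, same KeyError domain as A.
def pvMakeVariant (template : List (String × String)) (variant_index : Nat) : List (String × String) :=
  let d := PySem.Dict.ofList template
  ((d.insert "id" (((d.get? "id").getD "") ++ "_v" ++ PySem.Int.toStr (variant_index : Int))).insert
      "question" (((d.get? "question").getD "") ++ " (variant " ++ PySem.Int.toStr (variant_index : Int) ++ ")")).items

-- full, rem = divmod(target - n, n): both operands positive here, so Nat / and % are exact.
def expand_questions_to_target_py_alt (questions : List (List (String × String))) (target : Int) : List (List (String × String)) :=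
  if (questions.length : Int) ≥ target then PySem.List.slice questions none (some target)
  else if questions.isEmpty then questions
  else
    let n := questions.length
    let extra := (target - n).toNat
    let full := extra / n
    let rem := extra % n
    questions
      ++ (List.range full).flatMap (fun v => questions.map (fun q => pvMakeVariant q (v + 1)))
      ++ (questions.take rem).map (fun q => pvMakeVariant q (full + 1))

-- ===== PRECONDITION & SPEC =====
-- Pre_ excludes exactly the inputs on which Python raises KeyError: some template among the
-- first (target - len(questions)) questions (the ones actually used to build variants) lacks
-- the key 'id' or 'question'. A (and B) raise there and return nowhere on these inputs.
def Pre_expand_questions_to_target_py (questions : List (List (String × String))) (target : Int) : Prop :=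
  ∀ q ∈ questions.take (target - questions.length).toNat,
    (PySem.Dict.get? (PySem.Dict.ofList q) "id").isSome = true ∧
    (PySem.Dict.get? (PySem.Dict.ofList q) "question").isSome = true
instance (questions : List (List (String × String))) (target : Int) : Decidable (Pre_expand_questions_to_target_py questions target) := by unfold Pre_expand_questions_to_target_py; infer_instance

def pvWitness_expand_questions_to_target_py : (List (List (String × String))) × Int :=
  ([[("id", "q1"), ("question", "Q1")]], 3)

def Spec_expand_questions_to_target_py (questions : List (List (String × String))) (target : Int) (out : List (List (String × String))) : Prop := out = expand_questions_to_target_py_alt questions target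
instance (questions : List (List (String × String))) (target : Int) (out : List (List (String × String))) : Decidable (Spec_expand_questions_to_target_py questions target out) := by unfold Spec_expand_questions_to_target_py; infer_instance

-- ===== CLAIM (what is proved, stated in full; the proofs are below) =====
def Claim_equal_expand_questions_to_target_py : Prop := ∀ (questions : List (List (String × String))) (target : Int), Dom_expand_questions_to_target_py questions target → Pre_expand_questions_to_target_py questions target → Spec_expand_questions_to_target_py questions target (expand_questions_to_target_py questions target)

-- ===== LEMMAS AND PROOFS =====

-- the element A's loop appends at counter value c
def pvF (questions : List (List (String × String))) (c : Nat) : List (String × String) :=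
  pvMakeVariant ((PySem.List.pyGet? questions ((c % questions.length : Nat) : Int)).getD []) (c / questions.length + 1)

lemma pvLoopA_eq (questions : List (List (String × String))) (target : Int)
    (hq : questions ≠ []) :
    ∀ (k : Nat) (e : List (List (String × String))) (c : Nat),
      (target - e.length).toNat = k →
      pvLoopA questions target e c = e ++ (List.range k).map (fun j => pvF questions (c + j)) := by
  intro k
  induction k with
  | zero =>
    intro e c hk
    rw [pvLoopA, dif_neg (fun h => absurd h.1 (by omega))]
    simp
  | succ k ih =>
    intro e c hk
    rw [pvLoopA, dif_pos ⟨by omega, hq⟩]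
    show pvLoopA questions target (e ++ [pvF questions c]) (c + 1) =
      e ++ (List.range (k + 1)).map (fun j => pvF questions (c + j))
    rw [ih (e ++ [pvF questions c]) (c + 1) (by simp; omega)]
    simp only [List.range_succ_eq_map, List.map_cons, List.map_map, List.append_assoc,
      List.singleton_append, Nat.add_zero]
    congr 2
    exact List.map_congr_left (fun j _ => by simp [Function.comp]; congr 1; omega)

lemma pvChunk {α : Type} (n : Nat) (hn : 0 < n) :
    ∀ (full : Nat) (g : Nat → Nat → α) (rem : Nat), rem < n →
      (List.range (full * n + rem)).map (fun c => g (c % n) (c / n)) =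
      (List.range full).flatMap (fun v => (List.range n).map (fun i => g i v))
        ++ (List.range rem).map (fun i => g i full) := by
  intro full
  induction full with
  | zero =>
    intro g rem hrem
    simp only [Nat.zero_mul, Nat.zero_add, List.range_zero, List.flatMap_nil, List.nil_append]
    exact List.map_congr_left fun c hc => by
      have : c < rem := List.mem_range.mp hc
      rw [Nat.mod_eq_of_lt (by omega), Nat.div_eq_of_lt (by omega)]
  | succ full ih =>
    intro g rem hrem
    have hsplit : (full + 1) * n + rem = n + (full * n + rem) := by ring
    rw [hsplit, List.range_add, List.map_append, List.map_map]
    have h1 : (List.range n).map (fun c => g (c % n) (c / n)) = (List.range n).map (fun i => g i 0) :=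
      List.map_congr_left fun c hc => by
        have : c < n := List.mem_range.mp hc
        rw [Nat.mod_eq_of_lt (by omega), Nat.div_eq_of_lt (by omega)]
    have h2 : (List.range (full * n + rem)).map ((fun c => g (c % n) (c / n)) ∘ (n + ·)) =
        (List.range (full * n + rem)).map (fun c => (fun i v => g i (v + 1)) (c % n) (c / n)) :=
      List.map_congr_left fun c _ => by
        simp only [Function.comp]
        rw [Nat.add_mod_left, Nat.add_div_left _ hn]
    rw [h1, h2, ih (fun i v => g i (v + 1)) rem hrem]
    rw [List.range_succ_eq_map, List.flatMap_cons, List.flatMap_map]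
    simp only [List.append_assoc]

lemma pvMapRangeGet {α β : Type} (xs : List α) (d : α) (f : α → β) (m : Nat) (hm : m ≤ xs.length) :
    (List.range m).map (fun i => f ((PySem.List.pyGet? xs ((i : Nat) : Int)).getD d)) =
    (xs.take m).map f := by
  apply List.ext_getElem
  · simp; omega
  · intro i h1 h2
    simp only [List.getElem_map, List.getElem_range, List.getElem_take]
    have hi : i < xs.length := by simp at h2; omega
    rw [PySem.List.pyGet?_natCast]
    simp [List.getElem?_eq_getElem hi]

-- ===== VERDICT (by name: the statement is the Claim_ definition above) =====
theorem expand_questions_to_target_py_spec : Claim_equal_expand_questions_to_target_py := by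
  intro questions target _ _
  show expand_questions_to_target_py questions target = expand_questions_to_target_py_alt questions target
  by_cases hge : (questions.length : Int) ≥ target
  · simp [expand_questions_to_target_py, expand_questions_to_target_py_alt, hge]
  · by_cases hq : questions = []
    · subst hq
      rw [expand_questions_to_target_py, if_neg hge, expand_questions_to_target_py_alt, if_neg hge]
      rw [pvLoopA, dif_neg (fun h => h.2 rfl)]
      simp
    · have hn : 0 < questions.length := List.length_pos_iff.mpr hq
      have hlt : (questions.length : Int) < target := by omega
      set n := questions.length with hn_def
      set extra := (target - (n : Int)).toNat with hextra
      set full := extra / n with hfull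
      set rem := extra % n with hrem
      have hdm : full * n + rem = extra := by rw [hfull, hrem, Nat.mul_comm]; exact Nat.div_add_mod extra n
      have hremlt : rem < n := Nat.mod_lt _ hn
      rw [expand_questions_to_target_py, if_neg hge]
      rw [pvLoopA_eq questions target hq extra questions 0 rfl]
      rw [expand_questions_to_target_py_alt, if_neg hge, if_neg (by simpa [List.isEmpty_iff] using hq)]
      rw [List.append_assoc]
      congr 1
      have hshift : (List.range extra).map (fun j => pvF questions (0 + j)) =
          (List.range extra).map (fun c =>
            (fun i v => pvMakeVariant ((PySem.List.pyGet? questions ((i : Nat) : Int)).getD []) (v + 1)) (c % n) (c / n)) :=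
        List.map_congr_left fun c _ => by rw [Nat.zero_add]; rfl
      rw [hshift, ← hdm, pvChunk n hn full (fun i v => pvMakeVariant ((PySem.List.pyGet? questions ((i : Nat) : Int)).getD []) (v + 1)) rem hremlt]
      congr 1
      · exact List.flatMap_congr (fun v _ => by
          rw [pvMapRangeGet questions [] (fun q => pvMakeVariant q (v + 1)) n le_rfl, List.take_length])
      · exact pvMapRangeGet questions [] (fun q => pvMakeVariant q (full + 1)) rem (le_of_lt hremlt)
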